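-- pv_equiv track=rewrite | github.com/httppsdouq29/TT_ATTT | bai12.py | four_digit
-- ===== SOURCE A (Python) =====
-- import math
--
-- def is_prime(n):
--     if n <= 1:
--         return False
--     for i in range(2, int(math.sqrt(n)) + 1):
--         if n % i == 0:
--             return False
--     return True
--
-- def day_prime(n):
--     k = []
--     for i in range(2, n):  # Bắt đầu từ 2 vì 0 và 1 không phải là số nguyên tố
--         if is_prime(i):
--             k.append(i)
--     return k
--
-- def four_digit(n):
--     k = day_prime(n)
--     result = []
--     for i in range(len(k) - 3):
--         total = k[i] + k[i+1] + k[i+2] + k[i+3]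
--         if total <= n and is_prime(total):
--             result.append((k[i], k[i+1], k[i+2], k[i+3]))
--     return result
-- ===== SOURCE B (Python) =====
-- def four_digit(n):
--     # Every window of 4 consecutive primes other than (2, 3, 5, 7) consists of
--     # odd primes only, so its sum is even and > 2, hence never prime.  The only
--     # possible hit is 2+3+5+7 = 17 (prime), reported iff 17 <= n (which also
--     # guarantees at least 4 primes below n).
--     return [(2, 3, 5, 7)] if n >= 17 else []
-- ===== Notes on version B (the rewrite author's own statement) =====
-- stated objective: faster
-- what changed: B replaces the prime-list construction and quadratic-ish scan by a closed form: any 4 consecutive primes other than (2,3,5,7) are all odd, so their sum is even and never prime; hence the answer is [(2,3,5,7)] iff n >= 17.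
import Mathlib
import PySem

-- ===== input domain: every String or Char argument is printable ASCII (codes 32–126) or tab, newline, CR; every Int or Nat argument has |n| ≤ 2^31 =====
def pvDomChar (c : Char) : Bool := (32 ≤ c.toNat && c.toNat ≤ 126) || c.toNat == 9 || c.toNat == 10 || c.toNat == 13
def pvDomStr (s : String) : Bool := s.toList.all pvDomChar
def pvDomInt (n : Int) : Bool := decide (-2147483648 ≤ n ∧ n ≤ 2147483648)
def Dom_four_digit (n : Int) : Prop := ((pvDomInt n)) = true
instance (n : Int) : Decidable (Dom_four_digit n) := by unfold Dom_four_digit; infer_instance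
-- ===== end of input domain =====

-- B replaces A's prime-list build and window scan by the closed form
-- [(2,3,5,7)] iff 17 ≤ n (every other window of 4 consecutive primes is all
-- odd, so its sum is even and never prime); objective: faster.


-- ===== PORT A =====
-- kernel-transparent floor square root (digit-by-digit); `pySqrt m` is exactly
-- int(math.sqrt(m)) on the |n| ≤ 2^31 domain, where the correctly rounded
-- double sqrt agrees with the integer floor square root (exact for m < 2^52)
def isqrtLoop : Nat → Nat → Nat
  | 0, _ => 0
  | fuel + 1, m =>
    if m = 0 then 0
    else
      let r := 2 * isqrtLoop fuel (m / 4)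
      if (r + 1) * (r + 1) ≤ m then r + 1 else r

def pySqrt (m : Nat) : Nat := isqrtLoop m m

def is_primeA (n : Int) : Bool :=
  if n ≤ 1 then false
  else (PySem.List.pyRange 2 (Int.ofNat (pySqrt n.toNat) + 1) 1).all
        (fun i => !(PySem.Int.mod n i == 0))

def day_primeA (n : Int) : List Int :=
  (PySem.List.pyRange 2 n 1).foldl (fun k i => if is_primeA i then k ++ [i] else k) []

def four_digit (n : Int) : List (List Int) :=
  let k := day_primeA n
  (PySem.List.pyRange 0 ((k.length : Int) - 3) 1).foldl
    (fun result i =>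
      -- indices i..i+3 are always in range here, so pyGet? is always `some`;
      -- the .getD 0 default is unreachable
      let a := (PySem.List.pyGet? k i).getD 0
      let b := (PySem.List.pyGet? k (i + 1)).getD 0
      let c := (PySem.List.pyGet? k (i + 2)).getD 0
      let d := (PySem.List.pyGet? k (i + 3)).getD 0
      let total := a + b + c + d
      if total ≤ n && is_primeA total then result ++ [[a, b, c, d]] else result)
    []

-- ===== PORT B =====
def four_digit_alt (n : Int) : List (List Int) :=
  if 17 ≤ n then [[2, 3, 5, 7]] else []

-- ===== PRECONDITION & SPEC =====
def Spec_four_digit (n : Int) (out : List (List Int)) : Prop := out = four_digit_alt n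
instance (n : Int) (out : List (List Int)) : Decidable (Spec_four_digit n out) := by unfold Spec_four_digit; infer_instance

-- ===== CLAIM (what is proved, stated in full; the proofs are below) =====
def Claim_equal_four_digit : Prop := ∀ (n : Int), Dom_four_digit n → Spec_four_digit n (four_digit n)

-- ===== LEMMAS AND PROOFS =====

theorem isqrtLoop_succ (fuel m : Nat) :
    isqrtLoop (fuel + 1) m =
      if m = 0 then 0
      else
        let r := 2 * isqrtLoop fuel (m / 4)
        if (r + 1) * (r + 1) ≤ m then r + 1 else r := rfl

theorem isqrtLoop_one_le (fuel m : Nat) (hf : 1 ≤ fuel) (hm : 1 ≤ m) :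
    1 ≤ isqrtLoop fuel m := by
  obtain ⟨f, rfl⟩ : ∃ f, fuel = f + 1 := ⟨fuel - 1, by omega⟩
  rw [isqrtLoop_succ, if_neg (by omega)]
  dsimp only
  rcases Nat.eq_zero_or_pos (2 * isqrtLoop f (m / 4)) with h0 | h0
  · rw [h0, if_pos (by omega)]
  · split <;> omega

theorem pySqrt_two_le (m : Nat) (hm : 4 ≤ m) : 2 ≤ pySqrt m := by
  obtain ⟨f, hf⟩ : ∃ f, m = f + 1 := ⟨m - 1, by omega⟩
  unfold pySqrt
  rw [hf, isqrtLoop_succ, if_neg (by omega)]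
  dsimp only
  have h1 : 1 ≤ isqrtLoop f ((f + 1) / 4) := isqrtLoop_one_le f _ (by omega) (by omega)
  split <;> omega

-- an even number ≥ 4 fails A's trial division at i = 2
theorem is_primeA_even (m : Int) (h4 : 4 ≤ m) (he : m % 2 = 0) : is_primeA m = false := by
  unfold is_primeA
  rw [if_neg (by omega)]
  rw [List.all_eq_false]
  refine ⟨2, ?_, ?_⟩
  · rw [PySem.List.mem_pyRange_one]
    have h2 : 2 ≤ pySqrt m.toNat := pySqrt_two_le m.toNat (by omega)
    constructor
    · omega
    · simp only [Int.ofNat_eq_natCast]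
      omega
  · rw [PySem.Int.mod_eq_emod_of_pos (by norm_num)]
    simp [he]

-- k = [2,3,5,7] ++ (the primes in [8, n))
theorem day_primeA_structure (n : Int) (h : 8 ≤ n) :
    day_primeA n = [2, 3, 5, 7] ++ (PySem.List.pyRange 8 n 1).filter is_primeA := by
  unfold day_primeA
  rw [PySem.List.pyRange_one_append 2 8 n (by omega) h]
  rw [List.foldl_append]
  have h1 : (PySem.List.pyRange 2 8 1).foldl
      (fun k i => if is_primeA i then k ++ [i] else k) [] = [2, 3, 5, 7] := by decide
  rw [h1, PySem.List.foldl_append_if_eq_filter]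

-- every prime ≥ 8 found by A's test is odd (and ≥ 3)
theorem tail_odd (n : Int) (x : Int)
    (hx : x ∈ (PySem.List.pyRange 8 n 1).filter is_primeA) : x % 2 = 1 ∧ 3 ≤ x := by
  rw [List.mem_filter, PySem.List.mem_pyRange_one] at hx
  obtain ⟨⟨h8, _⟩, hp⟩ := hx
  refine ⟨?_, by omega⟩
  by_contra hodd
  have he : x % 2 = 0 := by omega
  rw [is_primeA_even x (by omega) he] at hp
  exact absurd hp (by simp)

-- elements of k at positions ≥ 1 are odd and ≥ 3
theorem get_odd (t : List Int) (hodd : ∀ x ∈ t, x % 2 = 1 ∧ 3 ≤ x) (j : Int)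
    (h1 : 1 ≤ j) (h2 : j < 4 + (t.length : Int)) :
    ((PySem.List.pyGet? (2 :: 3 :: 5 :: 7 :: t) j).getD 0) % 2 = 1 ∧
      3 ≤ (PySem.List.pyGet? (2 :: 3 :: 5 :: 7 :: t) j).getD 0 := by
  have hj0 : (0 : Int) ≤ j := by omega
  rw [PySem.List.pyGet?_of_nonneg _ hj0]
  have hlen : (2 :: 3 :: 5 :: 7 :: t).length = 4 + t.length := by simp; omega
  have hj : j.toNat < (2 :: 3 :: 5 :: 7 :: t).length := by omega
  rw [List.getElem?_eq_getElem hj]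
  obtain ⟨i, hi⟩ : ∃ i, j.toNat = i + 1 := ⟨j.toNat - 1, by omega⟩
  have hi4 : i < (3 :: 5 :: 7 :: t).length := by simp at hlen ⊢; omega
  have hel : (2 :: 3 :: 5 :: 7 :: t)[j.toNat] = (3 :: 5 :: 7 :: t)[i] := by
    simp only [hi, List.getElem_cons_succ]
  rw [hel]
  have hmem : (3 :: 5 :: 7 :: t)[i] ∈ (3 :: 5 :: 7 :: t) := List.getElem_mem hi4
  simp only [List.mem_cons] at hmem
  rcases hmem with hv | hv | hv | hmem
  · rw [hv]; norm_num
  · rw [hv]; norm_num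
  · rw [hv]; norm_num
  · simpa using hodd _ hmem

theorem foldl_id {α β : Type} (l : List α) (f : β → α → β) (acc : β)
    (h : ∀ a : β, ∀ x ∈ l, f a x = a) : l.foldl f acc = acc := by
  induction l generalizing acc with
  | nil => rfl
  | cons y ys ih =>
      rw [List.foldl_cons, h acc y (by simp)]
      exact ih acc fun a x hx => h a x (by simp [hx])

theorem four_digit_big (n : Int) (h : 8 ≤ n) :
    four_digit n = if 17 ≤ n then [[2, 3, 5, 7]] else [] := by
  unfold four_digit
  rw [day_primeA_structure n h]
  set t := (PySem.List.pyRange 8 n 1).filter is_primeA with ht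
  have hodd : ∀ x ∈ t, x % 2 = 1 ∧ 3 ≤ x := fun x hx => tail_odd n x (ht ▸ hx)
  have hk : ([2, 3, 5, 7] ++ t) = 2 :: 3 :: 5 :: 7 :: t := rfl
  rw [hk]
  dsimp only
  have hlen : (((2 :: 3 :: 5 :: 7 :: t).length : Int)) - 3 = 1 + (t.length : Int) := by
    simp; omega
  rw [hlen]
  rw [PySem.List.pyRange_one_cons (by omega)]
  rw [List.foldl_cons]
  -- the i = 0 step: window (2,3,5,7), total = 17
  have ha : (PySem.List.pyGet? (2 :: 3 :: 5 :: 7 :: t) 0).getD 0 = 2 := by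
    rw [PySem.List.pyGet?_zero_cons]; rfl
  have hb : (PySem.List.pyGet? (2 :: 3 :: 5 :: 7 :: t) (0 + 1)).getD 0 = 3 := by
    rw [PySem.List.pyGet?_of_nonneg _ (by norm_num)]; simp
  have hc : (PySem.List.pyGet? (2 :: 3 :: 5 :: 7 :: t) (0 + 2)).getD 0 = 5 := by
    rw [PySem.List.pyGet?_of_nonneg _ (by norm_num)]; simp
  have hd : (PySem.List.pyGet? (2 :: 3 :: 5 :: 7 :: t) (0 + 3)).getD 0 = 7 := by
    rw [PySem.List.pyGet?_of_nonneg _ (by norm_num)]; simp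
  simp only [ha, hb, hc, hd]
  have h17 : is_primeA (2 + 3 + 5 + 7) = true := by decide
  rw [h17]
  -- the remaining steps (i ≥ 1) each leave the accumulator unchanged
  have hrest : ∀ (acc : List (List Int)),
      (PySem.List.pyRange 1 (1 + (t.length : Int)) 1).foldl
        (fun result i =>
          let a := (PySem.List.pyGet? (2 :: 3 :: 5 :: 7 :: t) i).getD 0
          let b := (PySem.List.pyGet? (2 :: 3 :: 5 :: 7 :: t) (i + 1)).getD 0
          let c := (PySem.List.pyGet? (2 :: 3 :: 5 :: 7 :: t) (i + 2)).getD 0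
          let d := (PySem.List.pyGet? (2 :: 3 :: 5 :: 7 :: t) (i + 3)).getD 0
          let total := a + b + c + d
          if total ≤ n && is_primeA total then result ++ [[a, b, c, d]] else result)
        acc = acc := by
    intro acc
    apply foldl_id
    intro a i hi
    rw [PySem.List.mem_pyRange_one] at hi
    obtain ⟨hi1, hi2⟩ := hi
    obtain ⟨o1, g1⟩ := get_odd t hodd i (by omega) (by omega)
    obtain ⟨o2, g2⟩ := get_odd t hodd (i + 1) (by omega) (by omega)
    obtain ⟨o3, g3⟩ := get_odd t hodd (i + 2) (by omega) (by omega)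
    obtain ⟨o4, g4⟩ := get_odd t hodd (i + 3) (by omega) (by omega)
    simp only
    rw [is_primeA_even _ (by omega) (by omega)]
    simp
  by_cases h17n : 17 ≤ n
  · rw [if_pos h17n]
    have : (decide (2 + 3 + 5 + 7 ≤ n) && true) = true := by simp; omega
    simp only [this, if_true]
    simpa using hrest [[2, 3, 5, 7]]
  · rw [if_neg h17n]
    have : (decide (2 + 3 + 5 + 7 ≤ n) && true) = false := by simp; omega
    simp only [this]
    simpa using hrest []

-- ===== VERDICT (by name: the statement is the Claim_ definition above) =====
theorem four_digit_spec : Claim_equal_four_digit := by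
  intro n _
  unfold Spec_four_digit four_digit_alt
  by_cases h8 : 8 ≤ n
  · rw [four_digit_big n h8]
  · have hn : n ≤ 7 := by omega
    by_cases h2 : n ≤ 2
    · have hr : PySem.List.pyRange 2 n 1 = [] := PySem.List.pyRange_one_eq_nil h2
      simp [four_digit, day_primeA, hr, PySem.List.pyRange_one_eq_nil (by norm_num : (-3 : Int) ≤ 0)]
      omega
    · have h3 : 3 ≤ n := by omega
      interval_cases n <;> decide
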